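-- pv_equiv track=rewrite | github.com/ala53/ocpdx | compiler/compiler.py | _calc_line
-- ===== SOURCE A (Python) =====
-- def _calc_line(data, offset):
--     linecount = 1
--     off = 1
--     curroff = 0
--     for c in data:
--         off += 1
--         curroff += 1
--         if c == "\n":
--             off = 1
--             linecount += 1
--         if curroff == offset: return (linecount, off)
-- ===== SOURCE B (Python) =====
-- def _calc_line(data, offset):
--     # Whole-prefix library scans instead of an incremental char-by-char loop.
--     if offset <= 0 or offset > len(data):
--         return None
--     prefix = data[:offset]
--     return (prefix.count("\n") + 1, offset - prefix.rfind("\n"))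
-- ===== Notes on version B (the rewrite author's own statement) =====
-- stated objective: faster
-- what changed: Replaces the incremental per-character line/column counters and early return with a guard plus two whole-prefix library scans: count('\n') for the line and rfind('\n') for the column.
import Mathlib
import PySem

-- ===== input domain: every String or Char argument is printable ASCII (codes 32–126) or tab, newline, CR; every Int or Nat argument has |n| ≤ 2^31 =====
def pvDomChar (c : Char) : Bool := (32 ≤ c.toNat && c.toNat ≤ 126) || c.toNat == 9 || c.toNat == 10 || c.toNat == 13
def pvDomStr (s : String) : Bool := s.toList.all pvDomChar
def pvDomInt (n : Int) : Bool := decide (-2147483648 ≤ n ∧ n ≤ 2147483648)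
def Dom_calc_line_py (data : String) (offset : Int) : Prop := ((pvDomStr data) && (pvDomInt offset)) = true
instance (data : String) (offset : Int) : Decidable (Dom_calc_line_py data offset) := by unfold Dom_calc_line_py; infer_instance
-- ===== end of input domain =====

-- B replaces A's incremental per-character counters by a guard plus two whole-prefix
-- library scans (count and rfind of the newline); measurably faster by a constant factor.

-- ===== PORT A =====
-- the 'for c in data:' loop with state (linecount, off, curroff) and early return
def calcLineLoop : List Char → Int → Int → Int → Int → Option (Int × Int)
  | [], _, _, _, _ => none
  | c :: rest, offset, linecount, off, curroff =>
    let off1 := off + 1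
    let curroff1 := curroff + 1
    let lcOff : Int × Int := if c = '\n' then (linecount + 1, 1) else (linecount, off1)
    if curroff1 = offset then some (lcOff.1, lcOff.2)
    else calcLineLoop rest offset lcOff.1 lcOff.2 curroff1

def calc_line_py (data : String) (offset : Int) : Option (Int × Int) :=
  calcLineLoop data.toList offset 1 1 0

-- ===== PORT B =====
def calc_line_py_alt (data : String) (offset : Int) : Option (Int × Int) :=
  if offset ≤ 0 ∨ PySem.Str.len data < offset then none
  else
    let pfx := PySem.Str.slice data none (some offset)
    some ((PySem.Str.count pfx "\n" : Int) + 1, offset - PySem.Str.rfind pfx "\n")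

-- ===== PRECONDITION & SPEC =====
def Spec_calc_line_py (data : String) (offset : Int) (out : Option (Int × Int)) : Prop := out = calc_line_py_alt data offset
instance (data : String) (offset : Int) (out : Option (Int × Int)) : Decidable (Spec_calc_line_py data offset out) := by unfold Spec_calc_line_py; infer_instance

-- ===== CLAIM (what is proved, stated in full; the proofs are below) =====
def Claim_equal_calc_line_py : Prop := ∀ (data : String) (offset : Int), Dom_calc_line_py data offset → Spec_calc_line_py data offset (calc_line_py data offset)

-- ===== LEMMAS AND PROOFS =====

-- index of the LAST newline in a list, -1 if none (cons-shaped spec for Chars.rfind with a 1-char needle)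
def lastNL (c : Char) : List Char → Int
  | [] => -1
  | a :: t => let r := lastNL c t; if r = -1 then (if a = c then 0 else -1) else r + 1

-- Chars.count.go with a single-char needle counts occurrences
lemma countGo_single (c : Char) : ∀ (l : List Char) (fuel acc : Nat), l.length ≤ fuel →
    PySem.Chars.count.go [c] fuel l acc = acc + l.count c := by
  intro l
  induction l with
  | nil => intro fuel acc _; cases fuel <;> simp [PySem.Chars.count.go]
  | cons h t ih =>
    intro fuel acc hf
    cases fuel with
    | zero => simp at hf
    | succ f =>
      by_cases hc : h = c
      · subst hc
        have : [h].isPrefixOf (h :: t) = true := by simp [List.isPrefixOf]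
        simp only [PySem.Chars.count.go, this, if_pos]
        rw [List.length_cons] at hf
        simpa [List.count_cons, Nat.add_comm, Nat.add_assoc, Nat.add_left_comm] using
          ih f (acc + 1) (by omega)
      · have : [c].isPrefixOf (h :: t) = false := by simp [List.isPrefixOf, hc, Ne.symm hc]
        simp only [PySem.Chars.count.go, this]
        rw [List.length_cons] at hf
        simp [ih f acc (by omega), List.count_cons, hc]

lemma count_single (c : Char) (l : List Char) : PySem.Chars.count l [c] = l.count c := by
  simpa using countGo_single c l l.length 0 le_rfl

-- rfind.go on a cons, shifted by one index
lemma rfindGo_cons (c a : Char) (t : List Char) : ∀ (j : Nat),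
    PySem.Chars.rfind.go (a :: t) [c] (j + 1) =
      (if PySem.Chars.rfind.go t [c] j = -1 then (if a = c then 0 else -1)
       else PySem.Chars.rfind.go t [c] j + 1) := by
  intro j
  induction j with
  | zero =>
    simp only [PySem.Chars.rfind.go]
    by_cases hp : [c].isPrefixOf t = true
    · simp [hp, List.isPrefixOf]
    · simp only [List.drop_succ_cons, List.drop_zero, hp]
      by_cases hac : a = c
      · subst hac; simp [List.isPrefixOf]
      · simp [List.isPrefixOf, hac, Ne.symm hac, hp]
  | succ j ih =>
    show (if [c].isPrefixOf (List.drop (j + 2) (a :: t)) = true then ((j + 2 : Nat) : Int)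
          else PySem.Chars.rfind.go (a :: t) [c] (j + 1)) = _
    rw [ih]
    by_cases hp : [c].isPrefixOf (List.drop (j + 1) t) = true
    · have : PySem.Chars.rfind.go t [c] (j + 1) = ((j + 1 : Nat) : Int) := by
        simp [PySem.Chars.rfind.go, hp]
      simp only [List.drop_succ_cons, hp, this]
      have h1 : ((j + 1 : Nat) : Int) ≠ -1 := by omega
      rw [if_neg h1]; push_cast; ring
    · have : PySem.Chars.rfind.go t [c] (j + 1) = PySem.Chars.rfind.go t [c] j := by
        simp [PySem.Chars.rfind.go, hp]
      simp only [List.drop_succ_cons, hp, this]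
      simp

lemma rfind_single (c : Char) (l : List Char) : PySem.Chars.rfind l [c] = lastNL c l := by
  induction l with
  | nil => simp [PySem.Chars.rfind, PySem.Chars.rfind.go, lastNL, List.isPrefixOf]
  | cons a t ih =>
    show PySem.Chars.rfind.go (a :: t) [c] (t.length + 1) = _
    rw [rfindGo_cons c a t t.length]
    show (if PySem.Chars.rfind t [c] = -1 then _ else PySem.Chars.rfind t [c] + 1) = _
    rw [ih]; simp [lastNL]

lemma lastNL_ge (c : Char) (l : List Char) : -1 ≤ lastNL c l := by
  induction l with
  | nil => simp [lastNL]
  | cons a t ih => simp only [lastNL]; split_ifs <;> omega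

-- characterisation of A's loop when the target offset lies inside the remaining data
lemma calcLineLoop_take : ∀ (l : List Char) (k : Nat) (linecount off curroff : Int),
    1 ≤ k → k ≤ l.length →
    calcLineLoop l (curroff + k) linecount off curroff =
      some (linecount + ((l.take k).count '\n' : Int),
        if lastNL '\n' (l.take k) = -1 then off + k else (k : Int) - lastNL '\n' (l.take k)) := by
  intro l
  induction l with
  | nil => intro k _ _ _ h1 h2; simp at h2; omega
  | cons c rest ih =>
    intro k linecount off curroff h1 h2
    match k, h1 with
    | 1, _ =>
      simp only [calcLineLoop]
      by_cases hc : c = '\n' <;>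
        simp [hc, lastNL, List.count_cons]
    | (k' + 1 + 1), _ =>
      have harg : curroff + ((k' + 2 : Nat) : Int) = (curroff + 1) + ((k' + 1 : Nat) : Int) := by
        push_cast; ring
      have hne : curroff + 1 ≠ (curroff + 1) + ((k' + 1 : Nat) : Int) := by push_cast; omega
      have hlen : k' + 1 ≤ rest.length := by simpa using h2
      by_cases hc : c = '\n'
      · simp only [calcLineLoop, harg, hc, eq_self_iff_true, if_true, if_false, if_neg hne]
        rw [ih (k' + 1) (linecount + 1) 1 (curroff + 1) (by omega) hlen]
        simp only [List.take_succ_cons, List.count_cons, lastNL]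
        have hge := lastNL_ge '\n' (rest.take (k' + 1))
        by_cases hr : lastNL '\n' (rest.take (k' + 1)) = -1 <;>
          simp [hr, hc] <;> (try split_ifs) <;> intros <;> push_cast <;> omega
      · simp only [calcLineLoop, harg, hc, if_false, if_neg hne, if_neg hc]
        rw [ih (k' + 1) linecount (off + 1) (curroff + 1) (by omega) hlen]
        simp only [List.take_succ_cons, List.count_cons, lastNL]
        have hge := lastNL_ge '\n' (rest.take (k' + 1))
        by_cases hr : lastNL '\n' (rest.take (k' + 1)) = -1 <;>
          simp [hr, hc] <;> (try split_ifs) <;> intros <;> push_cast <;> omega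

-- A's loop falls through (returns None) when the offset is out of range
lemma calcLineLoop_none : ∀ (l : List Char) (offset linecount off curroff : Int),
    (offset ≤ curroff ∨ curroff + l.length < offset) →
    calcLineLoop l offset linecount off curroff = none := by
  intro l
  induction l with
  | nil => intro _ _ _ _ _; rfl
  | cons c rest ih =>
    intro offset linecount off curroff h
    have hne : curroff + 1 ≠ offset := by
      rcases h with h | h
      · omega
      · simp only [List.length_cons] at h; push_cast at h; omega
    simp only [calcLineLoop, if_neg hne]
    apply ih
    rcases h with h | h
    · left; omega
    · right; simp only [List.length_cons] at h; push_cast at h ⊢; omega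

-- ===== VERDICT (by name: the statement is the Claim_ definition above) =====
theorem calc_line_py_spec : Claim_equal_calc_line_py := by
  intro data offset _
  unfold Spec_calc_line_py calc_line_py calc_line_py_alt
  by_cases hout : offset ≤ 0 ∨ PySem.Str.len data < offset
  · rw [if_pos hout]
    apply calcLineLoop_none
    rcases hout with h | h
    · left; omega
    · right; rw [PySem.Str.len_eq] at h; omega
  · rw [if_neg hout]
    show calcLineLoop data.toList offset 1 1 0 =
      some ((PySem.Str.count (PySem.Str.slice data none (some offset)) "\n" : Int) + 1,
        offset - PySem.Str.rfind (PySem.Str.slice data none (some offset)) "\n")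
    push_neg at hout
    obtain ⟨h0, hlen⟩ := hout
    rw [PySem.Str.len_eq] at hlen
    set k : Nat := offset.toNat with hk
    have hoff : offset = (k : Int) := by omega
    have h1 : 1 ≤ k := by omega
    have h2 : k ≤ data.toList.length := by omega
    have hpfx : (PySem.Str.slice data none (some offset)).toList = data.toList.take k := by
      simp only [PySem.Str.slice, String.toList_ofList]
      have : PySem.Chars.slice data.toList none (some offset) = data.toList.take offset.toNat :=
        PySem.List.slice_to _ (by omega)
      rw [this]
    rw [PySem.Str.count_eq, PySem.Str.rfind_eq, hpfx]
    have hcount := count_single '\n' (data.toList.take k)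
    have hrf := rfind_single '\n' (data.toList.take k)
    have hs : ("\n" : String).toList = ['\n'] := rfl
    rw [hs, hcount, hrf]
    have hA := calcLineLoop_take data.toList k 1 1 0 h1 h2
    rw [zero_add] at hA
    rw [hoff]
    have hge := lastNL_ge '\n' (data.toList.take k)
    refine hA.trans ?_
    by_cases hr : lastNL '\n' (data.toList.take k) = -1 <;>
      simp [hr] <;> (try split_ifs) <;> intros <;> push_cast <;> omega
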